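-- pv_equiv track=rewrite | github.com/deividmfl/apollo-obfuscated | complete_code_rewriter.py | rewrite_constants_and_strings
-- ===== SOURCE A (Python) =====
-- def rewrite_constants_and_strings(content):
--     """Rewrite hardcoded strings and constants that might be signatures"""
--     # Apollo-specific strings that are detection signatures
--     apollo_strings = [
--         '"Apollo"', "'Apollo'", '"apollo"', "'apollo'",
--         '"ApolloAgent"', '"ApolloTask"', '"ApolloMessage"',
--         '"User-Agent: Apollo"', '"Apollo HTTP Profile"',
--         '"Apollo.exe"', '"apollo.exe"'
--     ]
--
--     phantom_strings = [
--         '"Phantom"', "'Phantom'", '"phantom"', "'phantom'",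
--         '"SecureAgent"', '"SystemTask"', '"DataMessage"',
--         '"User-Agent: Mozilla/5.0"', '"Standard HTTP Profile"',
--         '"SystemUpdate.exe"', '"update.exe"'
--     ]
--
--     for i, apollo_str in enumerate(apollo_strings):
--         if i < len(phantom_strings):
--             content = content.replace(apollo_str, phantom_strings[i])
--
--     return content
-- ===== SOURCE B (Python) =====
-- def rewrite_constants_and_strings(content):
--     """Rewrite hardcoded strings and constants that might be signatures"""
--     replacements = [
--         ('"Apollo"', '"Phantom"'), ("'Apollo'", "'Phantom'"),
--         ('"apollo"', '"phantom"'), ("'apollo'", "'phantom'"),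
--         ('"ApolloAgent"', '"SecureAgent"'), ('"ApolloTask"', '"SystemTask"'),
--         ('"ApolloMessage"', '"DataMessage"'),
--         ('"User-Agent: Apollo"', '"User-Agent: Mozilla/5.0"'),
--         ('"Apollo HTTP Profile"', '"Standard HTTP Profile"'),
--         ('"Apollo.exe"', '"SystemUpdate.exe"'), ('"apollo.exe"', '"update.exe"')
--     ]
--     out = []
--     i = 0
--     n = len(content)
--     while i < n:
--         for apollo, phantom in replacements:
--             if content.startswith(apollo, i):
--                 out.append(phantom)
--                 i += len(apollo)
--                 break
--         else:
--             out.append(content[i])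
--             i += 1
--     return "".join(out)
-- ===== Notes on version B (the rewrite author's own statement) =====
-- stated objective: alternative
-- what changed: Replaces the 11 sequential str.replace passes by a single left-to-right scan that, at each position, looks up the first matching signature in a replacement table and emits its phantom; Pre_ excludes content containing two overlapping signature occurrences (sharing a boundary quote), where the result of A's replace cascade is an accidental artefact of pass order.
-- outside the precondition, e.g. on rewrite_constants_and_strings('"apollo"Apollo"'): A returns '"phantom"Phantom"', B returns '"phantom"Apollo"'
import Mathlib
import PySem

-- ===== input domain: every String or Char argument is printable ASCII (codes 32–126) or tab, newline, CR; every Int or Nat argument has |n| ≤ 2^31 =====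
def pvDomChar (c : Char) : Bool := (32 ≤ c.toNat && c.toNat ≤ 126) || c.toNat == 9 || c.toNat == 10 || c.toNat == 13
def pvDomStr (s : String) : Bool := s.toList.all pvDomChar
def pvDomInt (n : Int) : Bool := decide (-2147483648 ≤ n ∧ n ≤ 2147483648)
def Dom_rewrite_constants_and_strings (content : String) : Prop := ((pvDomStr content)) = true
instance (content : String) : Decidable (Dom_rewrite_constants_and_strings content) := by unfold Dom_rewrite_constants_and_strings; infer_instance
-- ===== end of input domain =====

-- B replaces A's 11 sequential str.replace passes by one left-to-right scan over a replacement
-- table (alternative decomposition, not claimed faster); equal outside Pre_'s overlap corner.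

-- ===== PORT A =====
def pvApolloStrings : List String :=
  ["\"Apollo\"", "'Apollo'", "\"apollo\"", "'apollo'",
   "\"ApolloAgent\"", "\"ApolloTask\"", "\"ApolloMessage\"",
   "\"User-Agent: Apollo\"", "\"Apollo HTTP Profile\"",
   "\"Apollo.exe\"", "\"apollo.exe\""]

def pvPhantomStrings : List String :=
  ["\"Phantom\"", "'Phantom'", "\"phantom\"", "'phantom'",
   "\"SecureAgent\"", "\"SystemTask\"", "\"DataMessage\"",
   "\"User-Agent: Mozilla/5.0\"", "\"Standard HTTP Profile\"",
   "\"SystemUpdate.exe\"", "\"update.exe\""]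

def rewrite_constants_and_strings (content : String) : String :=
  (PySem.List.enumerate pvApolloStrings 0).foldl
    (fun c ia =>
      if ia.1 < (pvPhantomStrings.length : Int) then
        PySem.Str.replace c ia.2 (PySem.List.pyGetD pvPhantomStrings ia.1 "")
      else c) content

-- ===== PORT B =====
def pvReplacements : List (List Char × List Char) :=
  [("\"Apollo\"".toList, "\"Phantom\"".toList), ("'Apollo'".toList, "'Phantom'".toList),
   ("\"apollo\"".toList, "\"phantom\"".toList), ("'apollo'".toList, "'phantom'".toList),
   ("\"ApolloAgent\"".toList, "\"SecureAgent\"".toList),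
   ("\"ApolloTask\"".toList, "\"SystemTask\"".toList),
   ("\"ApolloMessage\"".toList, "\"DataMessage\"".toList),
   ("\"User-Agent: Apollo\"".toList, "\"User-Agent: Mozilla/5.0\"".toList),
   ("\"Apollo HTTP Profile\"".toList, "\"Standard HTTP Profile\"".toList),
   ("\"Apollo.exe\"".toList, "\"SystemUpdate.exe\"".toList),
   ("\"apollo.exe\"".toList, "\"update.exe\"".toList)]

-- the while-loop of Source B: at each position emit the phantom of the first matching signature
-- (the for-loop with break is the find?) and skip it, else copy one character.
-- every table key is nonempty, so `t.drop (p.1.length - 1)` skips exactly len(apollo) chars of c :: t.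
def pvScanB : List Char → List Char
  | [] => []
  | c :: t =>
    match pvReplacements.find? (fun p => p.1.isPrefixOf (c :: t)) with
    | some p => p.2 ++ pvScanB (t.drop (p.1.length - 1))
    | none => c :: pvScanB t
termination_by l => l.length
decreasing_by
  · simp only [List.length_cons, List.length_drop]; omega
  · simp

def rewrite_constants_and_strings_alt (content : String) : String :=
  String.ofList (pvScanB content.toList)

-- ===== PRECONDITION & SPEC =====
def pvSigs : List (List Char) :=
  ["\"Apollo\"".toList, "'Apollo'".toList, "\"apollo\"".toList, "'apollo'".toList,
   "\"ApolloAgent\"".toList, "\"ApolloTask\"".toList, "\"ApolloMessage\"".toList,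
   "\"User-Agent: Apollo\"".toList, "\"Apollo HTTP Profile\"".toList,
   "\"Apollo.exe\"".toList, "\"apollo.exe\"".toList]

-- the "seams": two distinct signature occurrences overlapping in one quote character
def pvSeams : List (List Char) :=
  pvSigs.flatMap (fun p =>
    (pvSigs.filter (fun q => !(q == p) && (p.getLast? == q.head?))).map
      (fun q => p.dropLast ++ q))

-- Pre_ excludes content in which two of the signature strings occur overlapping in a shared
-- boundary quote (a seam such as "apollo"Apollo"): there the value A returns is an accidental
-- artefact of the order of its replace cascade, and B's single-pass value is equally defensible.
def Pre_rewrite_constants_and_strings (content : String) : Prop :=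
  ∀ s ∈ pvSeams, ¬ s <:+: content.toList

instance (content : String) : Decidable (Pre_rewrite_constants_and_strings content) := by
  unfold Pre_rewrite_constants_and_strings; infer_instance

def pvWitness_rewrite_constants_and_strings : String := "x=\"Apollo\""

def Spec_rewrite_constants_and_strings (content : String) (out : String) : Prop :=
  out = rewrite_constants_and_strings_alt content
instance (content : String) (out : String) : Decidable (Spec_rewrite_constants_and_strings content out) := by
  unfold Spec_rewrite_constants_and_strings; infer_instance

-- ===== CLAIM (what is proved, stated in full; the proofs are below) =====
def Claim_equal_rewrite_constants_and_strings : Prop :=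
  ∀ (content : String), Dom_rewrite_constants_and_strings content →
    Pre_rewrite_constants_and_strings content →
    Spec_rewrite_constants_and_strings content (rewrite_constants_and_strings content)


-- ===== LEMMAS AND PROOFS =====

-- proof-side view of the tables: the pairs with their pass index
def pvPairsI : List (Nat × List Char × List Char) :=
  [(0, "\"Apollo\"".toList, "\"Phantom\"".toList), (1, "'Apollo'".toList, "'Phantom'".toList),
   (2, "\"apollo\"".toList, "\"phantom\"".toList), (3, "'apollo'".toList, "'phantom'".toList),
   (4, "\"ApolloAgent\"".toList, "\"SecureAgent\"".toList),
   (5, "\"ApolloTask\"".toList, "\"SystemTask\"".toList),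
   (6, "\"ApolloMessage\"".toList, "\"DataMessage\"".toList),
   (7, "\"User-Agent: Apollo\"".toList, "\"User-Agent: Mozilla/5.0\"".toList),
   (8, "\"Apollo HTTP Profile\"".toList, "\"Standard HTTP Profile\"".toList),
   (9, "\"Apollo.exe\"".toList, "\"SystemUpdate.exe\"".toList),
   (10, "\"apollo.exe\"".toList, "\"update.exe\"".toList)]

-- str.replace old new (old nonempty), as a plain structural recursion
def pvRepl (old new : List Char) : List Char → List Char
  | [] => []
  | c :: t =>
    if old.isPrefixOf (c :: t) then new ++ pvRepl old new (t.drop (old.length - 1))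
    else c :: pvRepl old new t
termination_by l => l.length
decreasing_by
  · simp only [List.length_cons, List.length_drop]; omega
  · simp

-- tokenization: first matching signature (in table order) at each position, else a raw char
def pvTok : List Char → List (Sum (Nat × List Char × List Char) Char)
  | [] => []
  | c :: t =>
    match pvPairsI.find? (fun p => p.2.1.isPrefixOf (c :: t)) with
    | some p => Sum.inl p :: pvTok (t.drop (p.2.1.length - 1))
    | none => Sum.inr c :: pvTok t
termination_by l => l.length
decreasing_by
  · simp only [List.length_cons, List.length_drop]; omega
  · simp

-- how a token reads after the first j replace passes have run
def pvWord (j : Nat) (p : Nat × List Char × List Char) : List Char :=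
  if p.1 < j then p.2.2 else p.2.1

def pvRender (j : Nat) (ts : List (Sum (Nat × List Char × List Char) Char)) : List Char :=
  ts.flatMap (fun t => match t with | Sum.inl p => pvWord j p | Sum.inr c => [c])

def pvApplyAll (l : List Char) : List Char :=
  pvPairsI.foldl (fun c p => pvRepl p.2.1 p.2.2 c) l

def pvNoSeam (l : List Char) : Prop := ∀ s ∈ pvSeams, ¬ s <:+: l

def pvSuffPat (v : List Char) : Prop :=
  ∃ p ∈ pvPairsI, ∃ m, m < p.2.1.length ∧ v = p.2.1.drop m

-- ---- decidable facts about the literal tables ----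
lemma pvFact_len : ∀ p ∈ pvPairsI, 2 ≤ p.2.1.length ∧ 2 ≤ p.2.2.length ∧
    p.2.1.length ≤ 30 ∧ p.2.2.length ≤ 30 ∧ p.1 < 11 := by decide

lemma pvFact_FA : ∀ p ∈ pvPairsI, ∀ q ∈ pvPairsI, ∀ m, m < q.2.1.length →
    ((q.2.1.drop m).isPrefixOf p.2.2 = true → (q.2.1.drop m).isPrefixOf p.2.1 = true) ∧
    ¬ p.2.2.isPrefixOf (q.2.1.drop m) = true ∧
    (p.2.1.isPrefixOf (q.2.1.drop m) = true → (m = 0 ∧ p.2.1 = q.2.1)) := by decide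

lemma pvFact_FB : ∀ p ∈ pvPairsI, ∀ q ∈ pvPairsI, p.1 ≠ q.1 →
    ¬ p.2.1.isPrefixOf q.2.1 = true ∧ ¬ q.2.1.isPrefixOf p.2.1 = true ∧
    ¬ p.2.1.isPrefixOf q.2.2 = true ∧ ¬ q.2.2.isPrefixOf p.2.1 = true ∧
    p.2.1 ≠ q.2.1 := by decide

lemma pvFact_FC : ∀ q ∈ pvPairsI, ∀ o, o < 31 → 0 < o → ∀ p ∈ pvPairsI,
    (o + 1 < q.2.1.length → q.2.1[o]? ≠ p.2.1.head?) ∧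
    (o + 1 < q.2.2.length → q.2.2[o]? ≠ p.2.1.head?) := by decide

lemma pvFact_last : ∀ p ∈ pvPairsI, p.2.2.getLast? = p.2.1.getLast? := by decide

lemma pvFact_idx : ∀ p ∈ pvPairsI, ∀ q ∈ pvPairsI, p.1 = q.1 → p = q := by decide

lemma pvFact_sigs : ∀ p ∈ pvPairsI, p.2.1 ∈ pvSigs := by decide

lemma pvFact_map : pvPairsI.map (·.2) = pvReplacements := by decide

-- ---- generic helpers ----
lemma pvPfxCases {v w u : List Char} (h : v <+: w ++ u) :
    (v.length ≤ w.length ∧ v <+: w) ∨ (w <+: v ∧ v.drop w.length <+: u) := by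
  by_cases hl : v.length ≤ w.length
  · exact Or.inl ⟨hl, (List.isPrefix_append_of_length hl).1 h⟩
  · have hw : w <+: v := List.prefix_of_prefix_length_le (List.prefix_append w u) h (by omega)
    obtain ⟨r, hr⟩ := hw
    subst hr
    refine Or.inr ⟨⟨r, rfl⟩, ?_⟩
    obtain ⟨z, hz⟩ := h
    rw [List.drop_left]
    rw [List.append_assoc] at hz
    exact ⟨z, (List.append_cancel_left hz)⟩

lemma pvSplit {a : List Char} {c : Char} {t : List Char}
    (h : a <+: (c :: t)) (ha : a ≠ []) : c :: t = a ++ t.drop (a.length - 1) := by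
  obtain ⟨r, hr⟩ := h
  have h1 : List.drop a.length (a ++ r) = r := List.drop_left
  rw [hr] at h1
  have h2 : a.length = (a.length - 1) + 1 := by
    match a, ha with
    | x :: t', _ => simp
  rw [h2, List.drop_succ_cons] at h1
  rw [← hr, h1]

lemma pvSeam_mem {p q : List Char} (hp : p ∈ pvSigs) (hq : q ∈ pvSigs) (hne : q ≠ p)
    (hk : p.getLast? = q.head?) : (p.dropLast ++ q) ∈ pvSeams := by
  unfold pvSeams
  refine List.mem_flatMap.2 ⟨p, hp, ?_⟩
  refine List.mem_map.2 ⟨q, List.mem_filter.2 ⟨hq, ?_⟩, rfl⟩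
  simp [hne, hk]

lemma pvNoSeam_infix {l t : List Char} (h : pvNoSeam l) (ht : t <:+: l) : pvNoSeam t :=
  fun s hs hinf => h s hs (hinf.trans ht)

lemma pvTok_cons (c : Char) (t : List Char) :
    pvTok (c :: t) =
      match pvPairsI.find? (fun p => p.2.1.isPrefixOf (c :: t)) with
      | some p => Sum.inl p :: pvTok (t.drop (p.2.1.length - 1))
      | none => Sum.inr c :: pvTok t := by
  rw [pvTok]

lemma pvScanB_cons (c : Char) (t : List Char) :
    pvScanB (c :: t) =
      match pvReplacements.find? (fun p => p.1.isPrefixOf (c :: t)) with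
      | some p => p.2 ++ pvScanB (t.drop (p.1.length - 1))
      | none => c :: pvScanB t := by
  rw [pvScanB]

lemma pvRepl_cons (old new : List Char) (c : Char) (t : List Char) :
    pvRepl old new (c :: t) =
      if old.isPrefixOf (c :: t) then new ++ pvRepl old new (t.drop (old.length - 1))
      else c :: pvRepl old new t := by
  rw [pvRepl]

lemma pvRender_cons_chr (j : Nat) (c : Char) (ts : List (Sum (Nat × List Char × List Char) Char)) :
    pvRender j (Sum.inr c :: ts) = c :: pvRender j ts := by simp [pvRender]

lemma pvRender_cons_tok (j : Nat) (p : Nat × List Char × List Char)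
    (ts : List (Sum (Nat × List Char × List Char) Char)) :
    pvRender j (Sum.inl p :: ts) = pvWord j p ++ pvRender j ts := by simp [pvRender]


-- rendered tokens never show a signature fragment that the source did not contain:
-- a (suffix of a) signature that is a prefix of any render stage is a prefix of the source
lemma pvMaster : ∀ (N : Nat) (l v : List Char) (j : Nat), l.length ≤ N → pvSuffPat v → v ≠ [] →
    v <+: pvRender j (pvTok l) → v <+: l := by
  intro N
  induction N with
  | zero =>
    intro l v j hl hsp hv hpre
    have hnil : l = [] := by cases l with | nil => rfl | cons a t => simp at hl
    subst hnil
    simp only [pvTok, pvRender, List.flatMap_nil, List.prefix_nil] at hpre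
    exact absurd hpre hv
  | succ N ih =>
    intro l v j hl hsp hv hpre
    match l with
    | [] =>
      simp only [pvTok, pvRender, List.flatMap_nil, List.prefix_nil] at hpre
      exact absurd hpre hv
    | c :: t =>
      rw [pvTok_cons] at hpre
      cases hfind : pvPairsI.find? (fun p => p.2.1.isPrefixOf (c :: t)) with
      | none =>
        rw [hfind] at hpre
        simp only [pvRender, List.flatMap_cons] at hpre
        match v, hv with
        | v0 :: v', _ =>
          have hpre' : v0 :: v' <+: c :: pvRender j (pvTok t) := by simpa using hpre
          obtain ⟨hc, hv'⟩ := List.cons_prefix_cons.1 hpre'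
          subst hc
          by_cases hnil : v' = []
          · subst hnil; exact ⟨t, rfl⟩
          · obtain ⟨p, hp, m, hm, hveq⟩ := hsp
            have hd : p.2.1.drop m = v0 :: v' := hveq.symm
            have hdl : p.2.1.drop (m + 1) = v' := by
              have : (p.2.1.drop m).drop 1 = p.2.1.drop (m + 1) := by
                rw [List.drop_drop]
              rw [hd] at this; simpa using this.symm
            have hm1 : m + 1 < p.2.1.length := by
              have hlen : (p.2.1.drop m).length = p.2.1.length - m := List.length_drop ..
              rw [hd] at hlen
              have : v'.length ≠ 0 := fun h0 => hnil (List.eq_nil_of_length_eq_zero h0)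
              simp only [List.length_cons] at hlen
              omega
            have hrec := ih t v' j (by simp at hl; omega)
              ⟨p, hp, m + 1, hm1, hdl.symm⟩ hnil hv'
            exact List.cons_prefix_cons.2 ⟨rfl, hrec⟩
      | some p =>
        have hmem := List.mem_of_find?_eq_some hfind
        have hpf : p.2.1 <+: (c :: t) := List.isPrefixOf_iff_prefix.1 (by simpa using List.find?_some hfind)
        have hane : p.2.1 ≠ [] := by
          have := (pvFact_len p hmem).1; intro h0; rw [h0] at this; simp at this
        have hsplit : c :: t = p.2.1 ++ t.drop (p.2.1.length - 1) := pvSplit hpf hane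
        rw [hfind] at hpre
        simp only [pvRender, List.flatMap_cons] at hpre
        obtain ⟨q, hq, m, hm, hveq⟩ := hsp
        rcases pvPfxCases hpre with ⟨hlen, hvw⟩ | ⟨hwv, hrest⟩
        · have hva : v <+: p.2.1 := by
            subst hveq
            unfold pvWord at hvw
            split at hvw
            · exact List.isPrefixOf_iff_prefix.1
                ((pvFact_FA p hmem q hq m hm).1 (List.isPrefixOf_iff_prefix.2 hvw))
            · exact hvw
          exact hva.trans ⟨_, hsplit.symm⟩
        · subst hveq
          unfold pvWord at hwv
          split at hwv
          · exact absurd (List.isPrefixOf_iff_prefix.2 hwv) (pvFact_FA p hmem q hq m hm).2.1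
          · obtain ⟨hm0, haq⟩ := (pvFact_FA p hmem q hq m hm).2.2 (List.isPrefixOf_iff_prefix.2 hwv)
            subst hm0
            rw [List.drop_zero, ← haq]
            exact ⟨_, hsplit.symm⟩

lemma pvR0 : ∀ (N : Nat) (l : List Char), l.length ≤ N → pvRender 0 (pvTok l) = l := by
  intro N
  induction N with
  | zero =>
    intro l hl
    have hnil : l = [] := by cases l with | nil => rfl | cons a t => simp at hl
    subst hnil; simp [pvTok, pvRender]
  | succ N ih =>
    intro l hl
    match l with
    | [] => simp [pvTok, pvRender]
    | c :: t =>
      rw [pvTok_cons]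
      cases hfind : pvPairsI.find? (fun p => p.2.1.isPrefixOf (c :: t)) with
      | none =>
        simp only [pvRender, List.flatMap_cons]
        have := ih t (by simp at hl; omega)
        simp only [pvRender] at this
        simp [this]
      | some p =>
        have hmem := List.mem_of_find?_eq_some hfind
        have hpf : p.2.1 <+: (c :: t) := List.isPrefixOf_iff_prefix.1 (by simpa using List.find?_some hfind)
        have hane : p.2.1 ≠ [] := by
          have := (pvFact_len p hmem).1; intro h0; rw [h0] at this; simp at this
        have hsplit : c :: t = p.2.1 ++ t.drop (p.2.1.length - 1) := pvSplit hpf hane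
        simp only [pvRender, List.flatMap_cons]
        have hrec := ih (t.drop (p.2.1.length - 1)) (by simp at hl ⊢; omega)
        simp only [pvRender] at hrec
        have hw : pvWord 0 p = p.2.1 := by unfold pvWord; simp
        rw [hw, hrec, ← hsplit]

lemma pvScan_render : ∀ (N : Nat) (l : List Char), l.length ≤ N →
    pvScanB l = pvRender 11 (pvTok l) := by
  intro N
  induction N with
  | zero =>
    intro l hl
    have hnil : l = [] := by cases l with | nil => rfl | cons a t => simp at hl
    subst hnil; simp [pvTok, pvScanB, pvRender]
  | succ N ih =>
    intro l hl
    match l with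
    | [] => simp [pvTok, pvScanB, pvRender]
    | c :: t =>
      rw [pvScanB_cons, pvTok_cons]
      have hmapfind : pvReplacements.find? (fun p => p.1.isPrefixOf (c :: t)) =
          Option.map (·.2) (pvPairsI.find? (fun p => p.2.1.isPrefixOf (c :: t))) := by
        rw [← pvFact_map, List.find?_map]; rfl
      cases hfind : pvPairsI.find? (fun p => p.2.1.isPrefixOf (c :: t)) with
      | none =>
        rw [hmapfind, hfind]
        simp only [Option.map_none, pvRender, List.flatMap_cons]
        have := ih t (by simp at hl; omega)
        simp only [pvRender] at this
        simp [this]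
      | some p =>
        rw [hmapfind, hfind]
        have hmem := List.mem_of_find?_eq_some hfind
        simp only [Option.map_some, pvRender, List.flatMap_cons]
        have hrec := ih (t.drop (p.2.1.length - 1)) (by simp at hl ⊢; omega)
        simp only [pvRender] at hrec
        have hw : pvWord 11 p = p.2.2 := by
          unfold pvWord; simp [(pvFact_len p hmem).2.2.2.2]
        rw [hw, hrec]


-- PySem's str.replace equals the plain recursion pvRepl (for nonempty pattern)
lemma pvGo (old new : List Char) (hne : old ≠ []) : ∀ (fuel : Nat) (l acc : List Char),
    l.length ≤ fuel →
    PySem.Chars.replace.go old new fuel l acc = acc.reverse ++ pvRepl old new l := by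
  intro fuel
  induction fuel with
  | zero =>
    intro l acc hl
    have hnil : l = [] := by cases l with | nil => rfl | cons a t => simp at hl
    subst hnil
    simp [PySem.Chars.replace.go, pvRepl]
  | succ n ih =>
    intro l acc hl
    match l with
    | [] => simp [PySem.Chars.replace.go, pvRepl]
    | c :: t =>
      rw [pvRepl_cons]
      by_cases h : old.isPrefixOf (c :: t)
      · have hsplit : c :: t = old ++ t.drop (old.length - 1) :=
          pvSplit (List.isPrefixOf_iff_prefix.1 h) hne
        have hdrop : List.drop old.length (c :: t) = t.drop (old.length - 1) := by
          conv_lhs => rw [hsplit]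
          exact List.drop_left
        have hlen : (t.drop (old.length - 1)).length ≤ n := by
          simp only [List.length_drop]
          simp only [List.length_cons] at hl
          have : 1 ≤ old.length := by
            cases old with | nil => exact absurd rfl hne | cons x xs => simp
          omega
        simp only [PySem.Chars.replace.go, h, if_true]
        rw [hdrop, ih _ _ hlen]
        simp
      · have hlen : t.length ≤ n := by simp only [List.length_cons] at hl; omega
        simp only [PySem.Chars.replace.go, h]
        rw [ih _ _ hlen]
        simp

lemma pvStrReplace (s old new : String) (h : old.toList ≠ []) :
    PySem.Str.replace s old new = String.ofList (pvRepl old.toList new.toList s.toList) := by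
  show String.ofList (PySem.Chars.replace s.toList old.toList new.toList) = _
  unfold PySem.Chars.replace
  rw [if_neg (by simpa using h)]
  rw [pvGo old.toList new.toList h s.toList.length s.toList [] (le_refl _)]
  simp

-- replacing across a block in which the pattern matches nowhere passes the block through
lemma pvPass (a b : List Char) : ∀ (w u : List Char),
    (∀ o, o < w.length → ¬ a <+: (w.drop o ++ u)) →
    pvRepl a b (w ++ u) = w ++ pvRepl a b u := by
  intro w
  induction w with
  | nil => intro u _; simp
  | cons c w' ihw =>
    intro u hno
    rw [List.cons_append, pvRepl_cons]
    rw [if_neg]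
    · have := ihw u (fun o ho => by
        have := hno (o + 1) (by simp; omega)
        simpa using this)
      rw [this]; simp
    · intro hb
      exact hno 0 (by simp) (by simpa using List.isPrefixOf_iff_prefix.1 hb)

lemma pvWord_succ {p : Nat × List Char × List Char} {j : Nat} (h : p.1 ≠ j) :
    pvWord (j + 1) p = pvWord j p := by
  unfold pvWord
  rcases Nat.lt_trichotomy p.1 j with hlt | heq | hgt
  · rw [if_pos (by omega), if_pos hlt]
  · exact absurd heq h
  · rw [if_neg (by omega), if_neg (by omega)]

-- one replace pass advances the render stage by one (on seam-free content)
lemma pvStep : ∀ (N : Nat) (l : List Char) (p : Nat × List Char × List Char),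
    p ∈ pvPairsI → l.length ≤ N → pvNoSeam l →
    pvRepl p.2.1 p.2.2 (pvRender p.1 (pvTok l)) = pvRender (p.1 + 1) (pvTok l) := by
  intro N
  induction N with
  | zero =>
    intro l p hp hl hns
    have hnil : l = [] := by cases l with | nil => rfl | cons a t => simp at hl
    subst hnil
    simp [pvTok, pvRender, pvRepl]
  | succ N ih =>
    intro l p hp hl hns
    match l with
    | [] => simp [pvTok, pvRender, pvRepl]
    | c :: t =>
      have hane : p.2.1 ≠ [] := by
        have := (pvFact_len p hp).1; intro h0; rw [h0] at this; simp at this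
      have hlen2 : 2 ≤ p.2.1.length := (pvFact_len p hp).1
      rw [pvTok_cons]
      cases hfind : pvPairsI.find? (fun q => q.2.1.isPrefixOf (c :: t)) with
      | none =>
        rw [pvRender_cons_chr, pvRender_cons_chr]
        have hns' : pvNoSeam t := pvNoSeam_infix hns ((List.suffix_cons c t).isInfix)
        have hrec := ih t p hp (by simp at hl; omega) hns'
        rw [pvRepl_cons, if_neg, hrec]
        intro hb
        have hpre : p.2.1 <+: pvRender p.1 (pvTok (c :: t)) := by
          rw [pvTok_cons, hfind, pvRender_cons_chr]
          exact List.isPrefixOf_iff_prefix.1 hb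
        have hsp : pvSuffPat p.2.1 := ⟨p, hp, 0, by omega, by simp⟩
        have hone : p.2.1 <+: (c :: t) :=
          pvMaster (c :: t).length (c :: t) p.2.1 p.1 (le_refl _) hsp hane hpre
        have := List.find?_eq_none.1 hfind p hp
        exact this (List.isPrefixOf_iff_prefix.2 hone)
      | some p' =>
        have hmem' := List.mem_of_find?_eq_some hfind
        have hpf' : p'.2.1 <+: (c :: t) :=
          List.isPrefixOf_iff_prefix.1 (by simpa using List.find?_some hfind)
        have ha'ne : p'.2.1 ≠ [] := by
          have := (pvFact_len p' hmem').1; intro h0; rw [h0] at this; simp at this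
        have hsplit : c :: t = p'.2.1 ++ t.drop (p'.2.1.length - 1) := pvSplit hpf' ha'ne
        set t' := t.drop (p'.2.1.length - 1) with ht'
        have hns' : pvNoSeam t' := by
          refine pvNoSeam_infix hns ?_
          have : (c :: t).drop p'.2.1.length = t' := by
            conv_lhs => rw [hsplit]
            exact List.drop_left
          rw [← this]
          exact (List.drop_suffix _ _).isInfix
        have hlt' : t'.length ≤ N := by
          rw [ht']; simp only [List.length_drop]
          simp only [List.length_cons] at hl; omega
        have hrec := ih t' p hp hlt' hns'
        rw [pvRender_cons_tok, pvRender_cons_tok]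
        by_cases hij : p'.1 = p.1
        · have hpp : p' = p := pvFact_idx p' hmem' p hp hij
          subst hpp
          have hw : pvWord p'.1 p' = p'.2.1 := by unfold pvWord; simp
          have hw1 : pvWord (p'.1 + 1) p' = p'.2.2 := by unfold pvWord; simp
          rw [hw, hw1]
          rcases hA : p'.2.1 with _ | ⟨a0, a'⟩
          · exact absurd hA ha'ne
          · rw [List.cons_append, pvRepl_cons, if_pos]
            · have hrec' := hrec
              rw [ht', hA] at hrec'
              simp only [List.length_cons, Nat.add_sub_cancel] at hrec' ⊢
              rw [List.drop_left, hrec']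
            · rw [← List.cons_append, ← hA]
              exact List.isPrefixOf_iff_prefix.2 (List.prefix_append _ _)
        · -- a pass with a different index walks across this token unchanged
          have hfb := pvFact_FB p hp p' hmem' (fun h => hij (h.symm))
          have hwcases : pvWord p.1 p' = p'.2.1 ∨ pvWord p.1 p' = p'.2.2 := by
            unfold pvWord; split
            · exact Or.inr rfl
            · exact Or.inl rfl
          have hwlen : 2 ≤ (pvWord p.1 p').length ∧ (pvWord p.1 p').length ≤ 30 := by
            rcases hwcases with hw | hw <;> rw [hw]
            · exact ⟨(pvFact_len p' hmem').1, (pvFact_len p' hmem').2.2.1⟩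
            · exact ⟨(pvFact_len p' hmem').2.1, (pvFact_len p' hmem').2.2.2.1⟩
          have hnomatch : ∀ o, o < (pvWord p.1 p').length →
              ¬ p.2.1 <+: ((pvWord p.1 p').drop o ++ pvRender p.1 (pvTok t')) := by
            intro o ho hpre
            rcases Nat.eq_zero_or_pos o with ho0 | hopos
            · subst ho0
              simp only [List.drop_zero] at hpre
              rcases pvPfxCases hpre with ⟨_, hax⟩ | ⟨hwa, _⟩
              · rcases hwcases with hw | hw <;> rw [hw] at hax
                · exact hfb.1 (List.isPrefixOf_iff_prefix.2 hax)
                · exact hfb.2.2.1 (List.isPrefixOf_iff_prefix.2 hax)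
              · rcases hwcases with hw | hw <;> rw [hw] at hwa
                · exact hfb.2.1 (List.isPrefixOf_iff_prefix.2 hwa)
                · exact hfb.2.2.2.1 (List.isPrefixOf_iff_prefix.2 hwa)
            · rcases hA : p.2.1 with _ | ⟨a0, a'⟩
              · exact hane hA
              · have hoB : o + 1 < (pvWord p.1 p').length ∨ o + 1 = (pvWord p.1 p').length := by
                  omega
                rcases hoB with hmid | hlast
                · -- middle of a word: that position is never a quote
                  have hdropc : (pvWord p.1 p').drop o =
                      (pvWord p.1 p')[o] :: (pvWord p.1 p').drop (o + 1) :=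
                    List.drop_eq_getElem_cons ho
                  rw [hdropc, hA, List.cons_append] at hpre
                  obtain ⟨hhd, _⟩ := List.cons_prefix_cons.1 hpre
                  have hfc := pvFact_FC p' hmem' o (by have := hwlen.2; omega) hopos p hp
                  have hgo : (pvWord p.1 p')[o]? = p.2.1.head? := by
                    rw [List.getElem?_eq_getElem ho, hA, hhd]; rfl
                  rcases hwcases with hw | hw <;> rw [hw] at hgo
                  · exact hfc.1 (by rw [hw] at hmid; exact hmid) hgo
                  · exact hfc.2 (by rw [hw] at hmid; exact hmid) hgo
                · -- last char of the word: overlap there is exactly a seam in the source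
                  have hlen1 : ((pvWord p.1 p').drop o).length = 1 := by
                    simp only [List.length_drop]; omega
                  obtain ⟨ch, hch⟩ := List.length_eq_one_iff.1 hlen1
                  rw [hch, hA] at hpre
                  have hpre2 : a0 :: a' <+: ch :: pvRender p.1 (pvTok t') := by
                    simpa using hpre
                  obtain ⟨hch0, ha'u⟩ := List.cons_prefix_cons.1 hpre2
                  have ha'ne2 : a' ≠ [] := by
                    intro h0
                    rw [hA, h0] at hlen2; simp at hlen2
                  have hsp : pvSuffPat a' := ⟨p, hp, 1, by omega, by rw [hA]; rfl⟩
                  have ha't : a' <+: t' :=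
                    pvMaster t'.length t' a' p.1 (le_refl _) hsp ha'ne2 ha'u
                  -- ch is the closing quote of the matched signature p'
                  have hchlast : p'.2.1.getLast? = some ch := by
                    have hgo : (pvWord p.1 p')[o]? = some ch := by
                      rw [← List.head?_drop, hch]; rfl
                    have hgl : (pvWord p.1 p').getLast? = some ch := by
                      rw [List.getLast?_eq_getElem?, ← hgo]
                      congr 1; omega
                    rcases hwcases with hw | hw <;> rw [hw] at hgl
                    · exact hgl
                    · rw [← pvFact_last p' hmem']; exact hgl
                  -- the seam p'.2.1.dropLast ++ p.2.1 occurs in c :: t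
                  have hkind : p'.2.1.getLast? = p.2.1.head? := by
                    rw [hchlast, hA, hch0]; rfl
                  have hqne : p.2.1 ≠ p'.2.1 := hfb.2.2.2.2
                  have hseammem : (p'.2.1.dropLast ++ p.2.1) ∈ pvSeams :=
                    pvSeam_mem (pvFact_sigs p' hmem') (pvFact_sigs p hp) hqne hkind
                  have hgl' : p'.2.1.getLast ha'ne = ch := by
                    have := List.getLast?_eq_some_getLast (l := p'.2.1) ha'ne
                    rw [hchlast] at this
                    exact (Option.some_injective _ this.symm)
                  have hdecomp : c :: t = p'.2.1.dropLast ++ (ch :: t') := by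
                    conv_lhs => rw [hsplit]
                    rw [← List.dropLast_concat_getLast ha'ne, hgl']
                    simp
                  have hinf : (p'.2.1.dropLast ++ p.2.1) <:+: (c :: t) := by
                    obtain ⟨r, hr⟩ := ha't
                    refine List.IsPrefix.isInfix ⟨r, ?_⟩
                    rw [hdecomp, hA, List.append_assoc]
                    simp only [List.cons_append]
                    rw [hr, hch0]
                  exact hns _ hseammem hinf
          have hpass := pvPass p.2.1 p.2.2 (pvWord p.1 p') (pvRender p.1 (pvTok t')) hnomatch
          rw [hpass, hrec, pvWord_succ (fun h => hij h)]


lemma pvStep' (l : List Char) (p : Nat × List Char × List Char) (hp : p ∈ pvPairsI)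
    (h : pvNoSeam l) :
    pvRepl p.2.1 p.2.2 (pvRender p.1 (pvTok l)) = pvRender (p.1 + 1) (pvTok l) :=
  pvStep l.length l p hp (le_refl _) h

-- the 11 passes, chained: pass j advances the render stage from j to j+1
lemma pvChain (l : List Char) (h : pvNoSeam l) : pvApplyAll l = pvRender 11 (pvTok l) := by
  have e0 : pvRepl "\"Apollo\"".toList "\"Phantom\"".toList (pvRender 0 (pvTok l)) = pvRender 1 (pvTok l) :=
    pvStep' l (0, "\"Apollo\"".toList, "\"Phantom\"".toList) (by decide) h
  have e1 : pvRepl "'Apollo'".toList "'Phantom'".toList (pvRender 1 (pvTok l)) = pvRender 2 (pvTok l) :=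
    pvStep' l (1, "'Apollo'".toList, "'Phantom'".toList) (by decide) h
  have e2 : pvRepl "\"apollo\"".toList "\"phantom\"".toList (pvRender 2 (pvTok l)) = pvRender 3 (pvTok l) :=
    pvStep' l (2, "\"apollo\"".toList, "\"phantom\"".toList) (by decide) h
  have e3 : pvRepl "'apollo'".toList "'phantom'".toList (pvRender 3 (pvTok l)) = pvRender 4 (pvTok l) :=
    pvStep' l (3, "'apollo'".toList, "'phantom'".toList) (by decide) h
  have e4 : pvRepl "\"ApolloAgent\"".toList "\"SecureAgent\"".toList (pvRender 4 (pvTok l)) = pvRender 5 (pvTok l) :=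
    pvStep' l (4, "\"ApolloAgent\"".toList, "\"SecureAgent\"".toList) (by decide) h
  have e5 : pvRepl "\"ApolloTask\"".toList "\"SystemTask\"".toList (pvRender 5 (pvTok l)) = pvRender 6 (pvTok l) :=
    pvStep' l (5, "\"ApolloTask\"".toList, "\"SystemTask\"".toList) (by decide) h
  have e6 : pvRepl "\"ApolloMessage\"".toList "\"DataMessage\"".toList (pvRender 6 (pvTok l)) = pvRender 7 (pvTok l) :=
    pvStep' l (6, "\"ApolloMessage\"".toList, "\"DataMessage\"".toList) (by decide) h
  have e7 : pvRepl "\"User-Agent: Apollo\"".toList "\"User-Agent: Mozilla/5.0\"".toList (pvRender 7 (pvTok l)) = pvRender 8 (pvTok l) :=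
    pvStep' l (7, "\"User-Agent: Apollo\"".toList, "\"User-Agent: Mozilla/5.0\"".toList) (by decide) h
  have e8 : pvRepl "\"Apollo HTTP Profile\"".toList "\"Standard HTTP Profile\"".toList (pvRender 8 (pvTok l)) = pvRender 9 (pvTok l) :=
    pvStep' l (8, "\"Apollo HTTP Profile\"".toList, "\"Standard HTTP Profile\"".toList) (by decide) h
  have e9 : pvRepl "\"Apollo.exe\"".toList "\"SystemUpdate.exe\"".toList (pvRender 9 (pvTok l)) = pvRender 10 (pvTok l) :=
    pvStep' l (9, "\"Apollo.exe\"".toList, "\"SystemUpdate.exe\"".toList) (by decide) h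
  have e10 : pvRepl "\"apollo.exe\"".toList "\"update.exe\"".toList (pvRender 10 (pvTok l)) = pvRender 11 (pvTok l) :=
    pvStep' l (10, "\"apollo.exe\"".toList, "\"update.exe\"".toList) (by decide) h
  have h0 : l = pvRender 0 (pvTok l) := (pvR0 l.length l (le_refl _)).symm
  simp only [pvApplyAll, pvPairsI, List.foldl_cons, List.foldl_nil]
  conv_lhs => rw [h0]
  rw [e0, e1, e2, e3, e4, e5, e6, e7, e8, e9, e10]

def pvStrPairs : List (String × String) :=
  [("\"Apollo\"", "\"Phantom\""), ("'Apollo'", "'Phantom'"), ("\"apollo\"", "\"phantom\""), ("'apollo'", "'phantom'"), ("\"ApolloAgent\"", "\"SecureAgent\""), ("\"ApolloTask\"", "\"SystemTask\""), ("\"ApolloMessage\"", "\"DataMessage\""), ("\"User-Agent: Apollo\"", "\"User-Agent: Mozilla/5.0\""), ("\"Apollo HTTP Profile\"", "\"Standard HTTP Profile\""), ("\"Apollo.exe\"", "\"SystemUpdate.exe\""), ("\"apollo.exe\"", "\"update.exe\"")]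

lemma pvA_fold (content : String) :
    rewrite_constants_and_strings content =
      pvStrPairs.foldl (fun c pr => PySem.Str.replace c pr.1 pr.2) content := rfl

lemma pvFoldRepl : ∀ (ps : List (String × String)) (s : String), (∀ pr ∈ ps, pr.1.toList ≠ []) →
    ps.foldl (fun c pr => PySem.Str.replace c pr.1 pr.2) s =
    String.ofList ((ps.map (fun pr => (pr.1.toList, pr.2.toList))).foldl
      (fun c pr => pvRepl pr.1 pr.2 c) s.toList) := by
  intro ps
  induction ps with
  | nil => intro s _; simp
  | cons pr ps ih =>
    intro s h
    simp only [List.foldl_cons, List.map_cons]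
    rw [pvStrReplace s pr.1 pr.2 (h pr (List.mem_cons_self)),
      ih _ (fun x hx => h x (List.mem_cons_of_mem _ hx))]
    simp

lemma pvA_eq (content : String) :
    rewrite_constants_and_strings content = String.ofList (pvApplyAll content.toList) := by
  rw [pvA_fold, pvFoldRepl _ _ (by decide)]
  have hm : (pvStrPairs.map (fun pr => (pr.1.toList, pr.2.toList))) = pvPairsI.map (·.2) := by
    decide
  rw [hm, List.foldl_map]
  rfl

-- ===== VERDICT (by name: the statement is the Claim_ definition above) =====
theorem rewrite_constants_and_strings_spec : Claim_equal_rewrite_constants_and_strings := by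
  unfold Claim_equal_rewrite_constants_and_strings
  intro content _hdom hpre
  unfold Spec_rewrite_constants_and_strings
  have hns : pvNoSeam content.toList := hpre
  rw [pvA_eq content, pvChain _ hns, ← pvScan_render content.toList.length _ (le_refl _)]
  rfl
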